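-- pv_equiv track=rewrite | github.com/nick-ivanov/nnlogic | bindigit.py | bindigit
-- ===== SOURCE A (Python) =====
-- def bindigit(n, p, bits):
--     """ Returns binary digit of number n in position p """
--     MAX_DIGIT_LENGTH = 54
--     cp = 0 	# Current position
--     real_p = bits - p - 1
--     while(cp < MAX_DIGIT_LENGTH):		# Assume our number is less than 27 bits
--         if cp == real_p:
--             return n%2 	# Return remainder of division on 2 at current position
--         n = n // 2 		# Integer division
--         cp = cp + 1
--
--     return -1
-- ===== SOURCE B (Python) =====
-- def bindigit(n, p, bits):
--     """ Returns binary digit of number n in position p """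
--     real_p = bits - p - 1
--     if 0 <= real_p < 54:
--         return n // 2 ** real_p % 2
--     return -1
-- ===== Notes on version B (the rewrite author's own statement) =====
-- stated objective: simpler
-- what changed: Replaces the 54-step divide-by-2 loop with a single closed-form expression: compute real_p once, and if 0 <= real_p < 54 return n // 2**real_p % 2, else -1.
import Mathlib
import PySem

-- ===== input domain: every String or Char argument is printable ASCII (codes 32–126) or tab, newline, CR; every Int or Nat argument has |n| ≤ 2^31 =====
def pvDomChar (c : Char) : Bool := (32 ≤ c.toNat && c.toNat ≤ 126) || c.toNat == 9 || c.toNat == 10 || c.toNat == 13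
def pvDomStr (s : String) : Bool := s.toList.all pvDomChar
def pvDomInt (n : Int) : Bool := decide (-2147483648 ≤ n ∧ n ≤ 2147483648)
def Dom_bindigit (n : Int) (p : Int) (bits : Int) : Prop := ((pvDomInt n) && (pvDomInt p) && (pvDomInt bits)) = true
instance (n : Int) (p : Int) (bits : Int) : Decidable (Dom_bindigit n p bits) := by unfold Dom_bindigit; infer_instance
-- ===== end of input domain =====

-- B replaces A's 54-step divide-by-2 loop with one closed-form expression (simpler).

-- ===== PORT A =====
-- while(cp < 54): if cp == real_p: return n%2; n = n//2; cp = cp+1 — fuel = 54 - cp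
def pvLoopA : Int → Int → Int → Nat → Int
  | _, _, _, 0 => -1
  | n, rp, cp, Nat.succ k =>
      if cp = rp then PySem.Int.mod n 2
      else pvLoopA (PySem.Int.floordiv n 2) rp (cp + 1) k

def bindigit (n : Int) (p : Int) (bits : Int) : Int :=
  pvLoopA n (bits - p - 1) 0 54

-- ===== PORT B =====
def bindigit_alt (n : Int) (p : Int) (bits : Int) : Int :=
  let real_p := bits - p - 1
  if 0 ≤ real_p ∧ real_p < 54 then
    PySem.Int.mod (PySem.Int.floordiv n (2 ^ real_p.toNat)) 2
  else -1

-- ===== PRECONDITION & SPEC =====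
def Spec_bindigit (n : Int) (p : Int) (bits : Int) (out : Int) : Prop := out = bindigit_alt n p bits
instance (n : Int) (p : Int) (bits : Int) (out : Int) : Decidable (Spec_bindigit n p bits out) := by unfold Spec_bindigit; infer_instance

-- ===== CLAIM (what is proved, stated in full; the proofs are below) =====
def Claim_equal_bindigit : Prop := ∀ (n : Int) (p : Int) (bits : Int), Dom_bindigit n p bits → Spec_bindigit n p bits (bindigit n p bits)

-- ===== LEMMAS AND PROOFS =====

theorem pvFloordiv_pow_succ (n : Int) (j : Nat) :
    PySem.Int.floordiv (PySem.Int.floordiv n 2) (2 ^ j) = PySem.Int.floordiv n (2 ^ (j + 1)) := by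
  rw [PySem.Int.floordiv_eq_ediv_of_pos (b := 2) (by norm_num),
      PySem.Int.floordiv_eq_ediv_of_pos (b := (2:Int) ^ j) (by positivity),
      PySem.Int.floordiv_eq_ediv_of_pos (b := (2:Int) ^ (j + 1)) (by positivity),
      Int.ediv_ediv_of_nonneg (by norm_num)]
  rw [pow_succ, mul_comm]

theorem pvLoopA_closed (k : Nat) : ∀ (n cp rp : Int),
    pvLoopA n rp cp k =
      if cp ≤ rp ∧ rp < cp + k then
        PySem.Int.mod (PySem.Int.floordiv n (2 ^ (rp - cp).toNat)) 2
      else -1 := by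
  induction k with
  | zero =>
      intro n cp rp
      simp only [pvLoopA]
      rw [if_neg]; omega
  | succ k ih =>
      intro n cp rp
      simp only [pvLoopA]
      by_cases h : cp = rp
      · subst h
        have h0 : (cp - cp).toNat = 0 := by omega
        rw [if_pos rfl, h0, pow_zero, if_pos (by constructor <;> omega)]
        rw [PySem.Int.floordiv_eq_ediv_of_pos (b := 1) (by norm_num), Int.ediv_one]
      · rw [if_neg h, ih]
        by_cases h2 : cp + 1 ≤ rp ∧ rp < cp + 1 + (k : Int)
        · rw [if_pos h2, if_pos (by omega)]
          have hj : (rp - cp).toNat = (rp - (cp + 1)).toNat + 1 := by omega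
          rw [hj, pvFloordiv_pow_succ]
        · rw [if_neg h2, if_neg (by omega)]

-- ===== VERDICT (by name: the statement is the Claim_ definition above) =====
theorem bindigit_spec : Claim_equal_bindigit := by
  intro n p bits _
  show bindigit n p bits = bindigit_alt n p bits
  unfold bindigit bindigit_alt
  rw [pvLoopA_closed]
  by_cases h : 0 ≤ bits - p - 1 ∧ bits - p - 1 < 54
  · rw [if_pos (by omega)]
    simp only [if_pos h, sub_zero]
  · rw [if_neg (by omega)]
    simp only [if_neg h]
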